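-- pv_equiv track=rewrite | github.com/whyj107/CodeWar | 20221012_Cats and shelves.py | solution
-- ===== SOURCE A (Python) =====
-- def solution(start, finish):
--     cnt = 0
--     while start < finish:
--         if start + 3 <= finish:
--             start += 3
--         else:
--             start += 1
--         cnt += 1
--     return cnt
-- ===== SOURCE B (Python) =====
-- def solution(start, finish):
--     d = finish - start
--     if d <= 0:
--         return 0
--     return d // 3 + d % 3
-- ===== Notes on version B (the rewrite author's own statement) =====
-- stated objective: faster
-- what changed: Replaces the greedy +3/+1 simulation loop by the closed form d//3 + d%3 on the gap d = finish - start.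
import Mathlib
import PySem

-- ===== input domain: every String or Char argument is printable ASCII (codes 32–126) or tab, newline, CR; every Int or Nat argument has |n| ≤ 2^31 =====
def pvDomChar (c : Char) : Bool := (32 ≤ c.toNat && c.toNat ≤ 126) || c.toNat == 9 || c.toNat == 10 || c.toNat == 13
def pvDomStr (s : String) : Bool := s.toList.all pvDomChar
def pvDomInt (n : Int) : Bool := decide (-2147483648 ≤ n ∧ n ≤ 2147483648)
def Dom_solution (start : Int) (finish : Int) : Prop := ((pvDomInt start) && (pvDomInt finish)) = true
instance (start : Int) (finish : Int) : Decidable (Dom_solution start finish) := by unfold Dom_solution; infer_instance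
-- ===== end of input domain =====

-- B replaces A's greedy +3/+1 simulation loop by the O(1) closed form d//3 + d%3 (faster: asymptotic).


-- ===== PORT A =====
-- while loop of A as structural recursion on the remaining gap
def solutionLoop (start : Int) (finish : Int) (cnt : Int) : Int :=
  if start < finish then
    if start + 3 ≤ finish then solutionLoop (start + 3) finish (cnt + 1)
    else solutionLoop (start + 1) finish (cnt + 1)
  else cnt
termination_by (finish - start).toNat
decreasing_by all_goals omega

def solution (start : Int) (finish : Int) : Int := solutionLoop start finish 0

-- ===== PORT B =====
def solution_alt (start : Int) (finish : Int) : Int :=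
  let d := finish - start
  if d ≤ 0 then 0
  else PySem.Int.floordiv d 3 + PySem.Int.mod d 3

-- ===== PRECONDITION & SPEC =====
def Spec_solution (start : Int) (finish : Int) (out : Int) : Prop := out = solution_alt start finish
instance (start : Int) (finish : Int) (out : Int) : Decidable (Spec_solution start finish out) := by unfold Spec_solution; infer_instance

-- ===== CLAIM (what is proved, stated in full; the proofs are below) =====
def Claim_equal_solution : Prop := ∀ (start : Int) (finish : Int), Dom_solution start finish → Spec_solution start finish (solution start finish)

-- ===== LEMMAS AND PROOFS =====
-- closed form of B with floor-division rewritten to Lean's ediv (divisor 3 > 0)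
theorem solution_alt_eq (start finish : Int) :
    solution_alt start finish =
      if finish - start ≤ 0 then 0 else (finish - start) / 3 + (finish - start) % 3 := by
  show (if finish - start ≤ 0 then 0 else PySem.Int.floordiv (finish - start) 3 + PySem.Int.mod (finish - start) 3) = _
  rw [PySem.Int.floordiv_eq_ediv_of_pos (by norm_num), PySem.Int.mod_eq_emod_of_pos (by norm_num)]

-- loop invariant: solutionLoop adds the closed form to the accumulator
theorem solutionLoop_eq (n : Nat) : ∀ (start finish cnt : Int), (finish - start).toNat = n →
    solutionLoop start finish cnt = cnt + solution_alt start finish := by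
  induction n using Nat.strong_induction_on with
  | _ n ih =>
    intro start finish cnt hn
    rw [solutionLoop, solution_alt_eq]
    by_cases h1 : start < finish
    · rw [if_pos h1]
      by_cases h2 : start + 3 ≤ finish
      · rw [if_pos h2, ih (finish - (start + 3)).toNat (by omega) _ _ _ rfl, solution_alt_eq]
        split_ifs <;> omega
      · rw [if_neg h2, ih (finish - (start + 1)).toNat (by omega) _ _ _ rfl, solution_alt_eq]
        split_ifs <;> omega
    · rw [if_neg h1]
      split_ifs <;> omega

-- ===== VERDICT (by name: the statement is the Claim_ definition above) =====
theorem solution_spec : Claim_equal_solution := by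
  intro start finish _
  unfold Spec_solution solution
  rw [solutionLoop_eq (finish - start).toNat start finish 0 rfl]
  omega
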